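-- pv_equiv track=rewrite | github.com/bhushanasati25/TUF-DSA-Course | Python/Practice Problems.py | multipleof3
-- ===== SOURCE A (Python) =====
-- def multipleof3(n):
--     res = []
--
--     for i in range(1, n + 1):
--         temp = i
--         sumofc = 0
--         while temp > 0:
--             digit = temp % 10
--             sumofc += digit
--             temp //= 10
--
--         if sumofc % 3 == 0:
--             res.append(i)
--
--     return res
-- ===== SOURCE B (Python) =====
-- def multipleof3(n):
--     # digit sum of i is divisible by 3 iff i is: emit multiples of 3 directly
--     return list(range(3, n + 1, 3))
-- ===== Notes on version B (the rewrite author's own statement) =====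
-- stated objective: faster
-- what changed: Replaces the per-number digit-sum loop and divisibility test by directly emitting every third integer via a stepped range, using the fact that a number's digit sum is divisible by three exactly when the number is.
import Mathlib
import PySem

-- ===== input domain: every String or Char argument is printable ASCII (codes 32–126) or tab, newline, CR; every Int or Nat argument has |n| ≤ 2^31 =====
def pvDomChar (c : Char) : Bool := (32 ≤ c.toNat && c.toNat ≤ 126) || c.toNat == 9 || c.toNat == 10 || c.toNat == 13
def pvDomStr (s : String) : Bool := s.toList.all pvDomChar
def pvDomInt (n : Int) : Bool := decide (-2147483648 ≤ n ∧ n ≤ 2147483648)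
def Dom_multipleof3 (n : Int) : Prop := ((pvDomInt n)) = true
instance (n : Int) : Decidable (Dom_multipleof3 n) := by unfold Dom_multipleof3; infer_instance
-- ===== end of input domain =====

-- B replaces A's per-number digit-sum loop by directly emitting range(3, n+1, 3) (faster).


-- ===== PORT A =====
-- the inner 'while temp > 0' loop: returns sumofc after the loop
def digitLoop (temp sumofc : Int) : Int :=
  if temp > 0 then
    digitLoop (PySem.Int.floordiv temp 10) (sumofc + PySem.Int.mod temp 10)
  else sumofc
termination_by temp.toNat
decreasing_by
  rw [PySem.Int.floordiv_eq_ediv_of_pos (by omega)]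
  omega

def multipleof3 (n : Int) : List Int :=
  (PySem.List.pyRange 1 (n + 1) 1).foldl
    (fun res i => if PySem.Int.mod (digitLoop i 0) 3 == 0 then res ++ [i] else res) []

-- ===== PORT B =====
def multipleof3_alt (n : Int) : List Int :=
  PySem.List.pyRange 3 (n + 1) 3

-- ===== PRECONDITION & SPEC =====
def Spec_multipleof3 (n : Int) (out : List Int) : Prop := out = multipleof3_alt n
instance (n : Int) (out : List Int) : Decidable (Spec_multipleof3 n out) := by unfold Spec_multipleof3; infer_instance

-- ===== CLAIM (what is proved, stated in full; the proofs are below) =====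
def Claim_equal_multipleof3 : Prop := ∀ (n : Int), Dom_multipleof3 n → Spec_multipleof3 n (multipleof3 n)

-- ===== LEMMAS AND PROOFS =====

-- digit-sum loop result is congruent to acc + temp mod 3
lemma digitLoop_mod3 (temp acc : Int) (h : 0 ≤ temp) :
    PySem.Int.mod (digitLoop temp acc) 3 = PySem.Int.mod (acc + temp) 3 := by
  rw [digitLoop]
  split
  · next hpos =>
    rw [digitLoop_mod3 (PySem.Int.floordiv temp 10) (acc + PySem.Int.mod temp 10)
        (by rw [PySem.Int.floordiv_eq_ediv_of_pos (by omega)]; omega)]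
    rw [PySem.Int.floordiv_eq_ediv_of_pos (by omega : (0:Int) < 10),
        PySem.Int.mod_eq_emod_of_pos (by omega : (0:Int) < 10),
        PySem.Int.mod_eq_emod_of_pos (by omega : (0:Int) < 3),
        PySem.Int.mod_eq_emod_of_pos (by omega : (0:Int) < 3)]
    omega
  · next hnp =>
    have : temp = 0 := by omega
    simp [this]
termination_by temp.toNat
decreasing_by rw [PySem.Int.floordiv_eq_ediv_of_pos (by omega)]; omega

-- appending one more endpoint to a step-3 range
lemma pyRange3_succ (b : Int) (hb : 0 ≤ b) :
    PySem.List.pyRange 3 (b + 1) 3 =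
      PySem.List.pyRange 3 b 3 ++ (if 3 ≤ b ∧ 3 ∣ b then [b] else []) := by
  rw [PySem.List.pyRange_of_pos 3 (b + 1) (by omega), PySem.List.pyRange_of_pos 3 b (by omega)]
  by_cases h3 : 3 ≤ b
  · by_cases hd : (3:Int) ∣ b
    · obtain ⟨m, rfl⟩ := hd
      have hm1 : 1 ≤ m := by omega
      have e1 : (if (3:Int) < 3 * m + 1 then (((3:Int) * m + 1 - 3 + 3 - 1) / 3).toNat else 0)
          = (m.toNat - 1) + 1 := by rw [if_pos (by omega)]; omega
      have e2 : (if (3:Int) < 3 * m then (((3:Int) * m - 3 + 3 - 1) / 3).toNat else 0)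
          = m.toNat - 1 := by split <;> omega
      rw [e1, e2, if_pos ⟨h3, ⟨m, rfl⟩⟩, List.range_succ, List.map_append]
      congr 1
      simp only [List.map_cons, List.map_nil]
      congr 2
      omega
    · have h1 : ((b:Int) + 1 - 3 + 3 - 1) / 3 = (b - 3 + 3 - 1) / 3 := by omega
      rw [if_pos (show (3:Int) < b + 1 by omega), if_pos (show (3:Int) < b by omega),
          if_neg (show ¬((3:Int) ≤ b ∧ 3 ∣ b) from fun hc => hd hc.2), h1, List.append_nil]
  · rw [if_neg (show ¬(3:Int) < b + 1 by omega), if_neg (show ¬(3:Int) < b by omega),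
        if_neg (show ¬((3:Int) ≤ b ∧ 3 ∣ b) from fun hc => h3 hc.1)]
    simp

-- the filtered unit-step range is the step-3 range
lemma filter_range_eq (m : Nat) :
    (PySem.List.pyRange 1 (1 + (m : Int)) 1).filter (fun i => PySem.Int.mod i 3 == 0) =
      PySem.List.pyRange 3 (1 + (m : Int)) 3 := by
  induction m with
  | zero =>
    have h0 : (1:Int) + ((0:Nat):Int) = 1 := by simp
    rw [h0, PySem.List.pyRange_one_eq_nil (by omega),
        PySem.List.pyRange_of_pos 3 1 (by omega), if_neg (show ¬(3:Int) < 1 by omega)]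
    simp
  | succ k ih =>
    have hcast : (1 : Int) + ((k : Nat) + 1 : Nat) = (1 + (k:Int)) + 1 := by push_cast; ring
    rw [hcast, PySem.List.pyRange_one_succ_right (by omega), List.filter_append,
        pyRange3_succ (1 + (k:Int)) (by omega), ih]
    congr 1
    by_cases hd : (3:Int) ∣ (1 + (k:Int))
    · rw [if_pos ⟨by omega, hd⟩]
      simp [hd]
    · rw [if_neg (by tauto)]
      simp [hd]

-- ===== VERDICT (by name: the statement is the Claim_ definition above) =====
theorem multipleof3_spec : Claim_equal_multipleof3 := by
  intro n _
  unfold Spec_multipleof3 multipleof3 multipleof3_alt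
  rw [PySem.List.foldl_append_if_eq_filter]
  rw [List.nil_append]
  rw [List.filter_congr (fun i hi => ?_)]
  case _ =>
    by_cases hn : 0 ≤ n
    · have : n + 1 = 1 + (n.toNat : Int) := by omega
      rw [this, filter_range_eq]
    · rw [PySem.List.pyRange_one_eq_nil (by omega),
          PySem.List.pyRange_of_pos 3 (n+1) (by omega), if_neg (by omega)]
      simp
  · -- pointwise: digit-sum test equals plain mod-3 test on members (all ≥ 1)
    have h1 : 1 ≤ i := (PySem.List.mem_pyRange_one.mp hi).1
    rw [digitLoop_mod3 i 0 (by omega)]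
    simp
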